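-- pv_equiv track=rewrite | github.com/frngrit/learn-to-code-101 | python-exercise/cash_atm/cash_atm_sol.py | atm
-- ===== SOURCE A (Python) =====
-- def atm(amount):
--     result = {}
--     banks = [1000, 500, 100]
--     for bank in banks:
--         bank_count = amount // bank
--         amount -= bank_count * bank
--         result[bank] = bank_count
--
--     return result
-- ===== SOURCE B (Python) =====
-- def atm(amount):
--     # Reduce to hundreds, then peel mixed-radix digits (base 5, then 2)
--     # least-significant first: t = 10*c1000 + 5*c500 + 1*c100.
--     t = amount // 100
--     t, c100 = divmod(t, 5)
--     c1000, c500 = divmod(t, 2)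
--     return {1000: c1000, 500: c500, 100: c100}
-- ===== Notes on version B (the rewrite author's own statement) =====
-- stated objective: alternative
-- what changed: Instead of greedily dividing a running remainder by each denomination, B scales amount down to hundreds once and then peels the note counts as mixed-radix digits (divmod by 5, then by 2), least-significant first.
import Mathlib
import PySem

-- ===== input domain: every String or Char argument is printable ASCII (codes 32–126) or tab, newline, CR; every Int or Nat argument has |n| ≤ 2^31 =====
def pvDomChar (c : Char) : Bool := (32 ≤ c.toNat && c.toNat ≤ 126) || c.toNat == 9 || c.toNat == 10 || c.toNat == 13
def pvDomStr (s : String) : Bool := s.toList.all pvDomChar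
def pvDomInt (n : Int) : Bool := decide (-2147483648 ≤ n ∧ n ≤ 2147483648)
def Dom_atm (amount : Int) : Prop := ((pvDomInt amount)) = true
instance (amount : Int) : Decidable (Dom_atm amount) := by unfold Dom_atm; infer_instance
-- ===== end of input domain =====

-- B replaces A's greedy loop over denominations by a single reduction to hundreds followed by
-- mixed-radix digit extraction (divmod by 5, then by 2), building counts least-significant first; objective: alternative.


-- ===== PORT A =====
-- loop over banks = [1000, 500, 100], state = (result dict, remaining amount)
def atm (amount : Int) : List (Int × Int) :=
  (([1000, 500, 100] : List Int).foldl
    (fun (st : PySem.Dict Int Int × Int) (bank : Int) =>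
      let bank_count := PySem.Int.floordiv st.2 bank
      (st.1.insert bank bank_count, st.2 - bank_count * bank))
    (PySem.Dict.empty, amount)).1.items

-- ===== PORT B =====
-- t = amount // 100; t, c100 = divmod(t, 5); c1000, c500 = divmod(t, 2)
def atm_alt (amount : Int) : List (Int × Int) :=
  let t0 := PySem.Int.floordiv amount 100
  let t1 := PySem.Int.floordiv t0 5
  let c100 := PySem.Int.mod t0 5
  let c1000 := PySem.Int.floordiv t1 2
  let c500 := PySem.Int.mod t1 2
  [(1000, c1000), (500, c500), (100, c100)]

-- ===== PRECONDITION & SPEC =====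
def Spec_atm (amount : Int) (out : List (Int × Int)) : Prop := out = atm_alt amount
instance (amount : Int) (out : List (Int × Int)) : Decidable (Spec_atm amount out) := by unfold Spec_atm; infer_instance

-- ===== CLAIM (what is proved, stated in full; the proofs are below) =====
def Claim_equal_atm : Prop := ∀ (amount : Int), Dom_atm amount → Spec_atm amount (atm amount)

-- ===== LEMMAS AND PROOFS =====

-- ===== VERDICT (by name: the statement is the Claim_ definition above) =====
theorem atm_spec : Claim_equal_atm := by
  intro amount _
  unfold Spec_atm atm atm_alt
  simp only [List.foldl, PySem.Dict.insert, PySem.Dict.empty]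
  simp only [PySem.Int.floordiv_eq_ediv_of_pos (b := 1000) (by norm_num),
             PySem.Int.floordiv_eq_ediv_of_pos (b := 500) (by norm_num),
             PySem.Int.floordiv_eq_ediv_of_pos (b := 100) (by norm_num),
             PySem.Int.floordiv_eq_ediv_of_pos (b := 5) (by norm_num),
             PySem.Int.floordiv_eq_ediv_of_pos (b := 2) (by norm_num),
             PySem.Int.mod_eq_emod_of_pos (b := 5) (by norm_num),
             PySem.Int.mod_eq_emod_of_pos (b := 2) (by norm_num)]
  norm_num
  refine ⟨?_, ?_, ?_⟩ <;> omega
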